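-- pv_equiv track=rewrite | github.com/Yanis124/OthelloProjet | src/ai/heuristics/heuristique_utils_fonctions.py | stability
-- ===== SOURCE A (Python) =====
-- def stability(state, max_player_color, min_player_color):
--     """
--     Return a list where the first element is the stability score for the max player
--     and the second element is the stability score for the min player.
--     """
--     stability_max_player = 0
--     stability_min_player = 0
--
--     for row in range(len(state)):
--         for col in range(len(state)):
--             if state[row][col] == max_player_color:
--                 if is_stable(state, max_player_color, row, col):
--                     stability_max_player += 1  # increment stability score for the max player if stable
--                 # else:
--                 #     stability_max_player -= 1
--             elif state[row][col] == min_player_color: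
--                 if is_stable(state, min_player_color, row, col):
--                     stability_min_player += 1  # increment stability score for the min player if stable
--                 # else:
--                 #     stability_min_player -= 1
--
--     return [stability_max_player, stability_min_player]  # return the stability scores
--
-- def is_stable(state, player, row, col):
--     """
--     Return True if the piece is stable.
--     A piece is stable if it is in a corner or if it is on the edge of the board.
--     """
--     # check if the piece is in a corner or on the edge of the board and belongs to the specified player
--     if ((row == 0 or row == len(state) - 1) or (col == 0 or col == (len(state) - 1))) and state[row][col] == player:
--         return True  # return True if the piece is stable
--     return False  # false
-- ===== SOURCE B (Python) =====
-- def stability(state, max_player_color, min_player_color):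
--     """
--     Return [stability score for the max player, stability score for the min player].
--     A piece is stable iff it lies on the border of the n x n board (n = len(state)),
--     so only border cells are visited.
--     """
--     n = len(state)
--     stable_max = 0
--     stable_min = 0
--     for row in range(n):
--         if row == 0 or row == n - 1:
--             cols = range(n)          # full top/bottom edge
--         else:
--             cols = (0, n - 1)        # only the two side cells
--         for col in cols:
--             v = state[row][col]
--             if v == max_player_color:
--                 stable_max += 1
--             elif v == min_player_color:
--                 stable_min += 1
--     return [stable_max, stable_min]
-- ===== Notes on version B (the rewrite author's own statement) =====
-- stated objective: faster
-- what changed: B visits only the border cells of the n x n board (full first/last row plus the two side cells of each middle row) and counts each player's pieces there, instead of A's scan of all n^2 cells with a per-cell is_stable test.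
import Mathlib
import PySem

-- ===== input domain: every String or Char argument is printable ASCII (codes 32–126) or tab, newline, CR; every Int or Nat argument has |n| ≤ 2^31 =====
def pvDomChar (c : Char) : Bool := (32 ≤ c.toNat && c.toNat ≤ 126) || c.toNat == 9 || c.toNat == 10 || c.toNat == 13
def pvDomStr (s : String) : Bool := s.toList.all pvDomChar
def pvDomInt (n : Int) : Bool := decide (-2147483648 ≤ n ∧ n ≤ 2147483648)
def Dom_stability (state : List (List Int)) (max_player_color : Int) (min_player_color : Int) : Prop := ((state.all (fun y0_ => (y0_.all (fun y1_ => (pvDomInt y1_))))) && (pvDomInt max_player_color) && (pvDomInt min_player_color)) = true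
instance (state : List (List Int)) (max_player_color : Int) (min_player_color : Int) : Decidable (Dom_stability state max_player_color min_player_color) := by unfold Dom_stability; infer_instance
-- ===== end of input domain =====

-- B visits only the border cells (O(n)) instead of A's full-board scan with a per-cell
-- stability test (O(n^2)); objective: faster (asymptotic).

-- ===== PORT A =====
-- helper is_stable, literal
def pvIsStable (state : List (List Int)) (player row col : Int) : Bool :=
  if ((row == 0 || row == (state.length : Int) - 1) ||
      (col == 0 || col == (state.length : Int) - 1)) &&
     (PySem.List.pyGetD (PySem.List.pyGetD state row []) col 0 == player) then
    true
  else
    false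

-- the body of A's inner `for col` loop (pyGetD's default is never hit inside Pre_)
def pvBodyA (state : List (List Int)) (mx mn row : Int) (acc : Int × Int) (col : Int) : Int × Int :=
  let v := PySem.List.pyGetD (PySem.List.pyGetD state row []) col 0
  if v == mx then (if pvIsStable state mx row col then (acc.1 + 1, acc.2) else acc)
  else if v == mn then (if pvIsStable state mn row col then (acc.1, acc.2 + 1) else acc)
  else acc

def stability (state : List (List Int)) (max_player_color : Int) (min_player_color : Int) : List Int :=
  let n : Int := state.length
  let res := (PySem.List.pyRange 0 n).foldl
      (fun acc row =>
        (PySem.List.pyRange 0 n).foldl (pvBodyA state max_player_color min_player_color row) acc)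
      (0, 0)
  [res.1, res.2]

-- ===== PORT B =====
-- the body of B's inner `for col` loop: plain counting, no stability test
def pvBodyB (state : List (List Int)) (mx mn row : Int) (acc : Int × Int) (col : Int) : Int × Int :=
  let v := PySem.List.pyGetD (PySem.List.pyGetD state row []) col 0
  if v == mx then (acc.1 + 1, acc.2)
  else if v == mn then (acc.1, acc.2 + 1)
  else acc

def stability_alt (state : List (List Int)) (max_player_color : Int) (min_player_color : Int) : List Int :=
  let n : Int := state.length
  let res := (PySem.List.pyRange 0 n).foldl
      (fun acc row =>
        let cols := if row == 0 || row == n - 1 then PySem.List.pyRange 0 n else [0, n - 1]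
        cols.foldl (pvBodyB state max_player_color min_player_color row) acc)
      (0, 0)
  [res.1, res.2]

-- ===== PRECONDITION & SPEC =====
-- Pre_ excludes exactly the boards on which Python A raises IndexError: a row shorter
-- than the number of rows (A indexes every row at columns 0..len(state)-1).
def Pre_stability (state : List (List Int)) (max_player_color : Int) (min_player_color : Int) : Prop :=
  ∀ r ∈ state, state.length ≤ r.length
instance (state : List (List Int)) (max_player_color : Int) (min_player_color : Int) : Decidable (Pre_stability state max_player_color min_player_color) := by unfold Pre_stability; infer_instance

def pvWitness_stability : List (List Int) × Int × Int := ([[1, 2], [2, 1]], 1, 2)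

def Spec_stability (state : List (List Int)) (max_player_color : Int) (min_player_color : Int) (out : List Int) : Prop := out = stability_alt state max_player_color min_player_color
instance (state : List (List Int)) (max_player_color : Int) (min_player_color : Int) (out : List Int) : Decidable (Spec_stability state max_player_color min_player_color out) := by unfold Spec_stability; infer_instance

-- ===== CLAIM (what is proved, stated in full; the proofs are below) =====
def Claim_equal_stability : Prop := ∀ (state : List (List Int)) (max_player_color : Int) (min_player_color : Int), Dom_stability state max_player_color min_player_color → Pre_stability state max_player_color min_player_color → Spec_stability state max_player_color min_player_color (stability state max_player_color min_player_color)

-- ===== LEMMAS AND PROOFS =====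

-- at a border cell the two inner-loop bodies agree (A's is_stable test is then
-- equivalent to the colour test it repeats)
theorem pvBody_border (state : List (List Int)) (mx mn : Int) (r c : Nat)
    (hb : r = 0 ∨ r = state.length - 1 ∨ c = 0 ∨ c = state.length - 1)
    (hr : r < state.length) (acc : Int × Int) :
    pvBodyA state mx mn (↑r) acc (↑c) = pvBodyB state mx mn (↑r) acc (↑c) := by
  have hbb : (((r : Int) == 0 || (r : Int) == (state.length : Int) - 1) ||
      ((c : Int) == 0 || (c : Int) == (state.length : Int) - 1)) = true := by
    simp only [Bool.or_eq_true, beq_iff_eq]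
    omega
  simp only [pvBodyA, pvBodyB, pvIsStable, hbb, Bool.true_and]
  split_ifs with h1 h2 h3 h4 <;> simp_all

-- at an interior cell A's body is the identity
theorem pvBodyA_interior (state : List (List Int)) (mx mn : Int) (r c : Nat)
    (hr0 : r ≠ 0) (hr1 : r ≠ state.length - 1) (hc0 : c ≠ 0) (hc1 : c ≠ state.length - 1)
    (hr : r < state.length) (hc : c < state.length) (acc : Int × Int) :
    pvBodyA state mx mn (↑r) acc (↑c) = acc := by
  have hbb : (((r : Int) == 0 || (r : Int) == (state.length : Int) - 1) ||
      ((c : Int) == 0 || (c : Int) == (state.length : Int) - 1)) = false := by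
    simp only [Bool.or_eq_false_iff, beq_eq_false_iff_ne, ne_eq]
    omega
  simp only [pvBodyA, pvIsStable, hbb, Bool.false_and]
  split_ifs <;> simp_all

-- a fold whose body is the identity on every member is the identity
theorem pvFoldl_id {α β : Type} (l : List α) (f : β → α → β) (acc : β)
    (h : ∀ (a : β), ∀ x ∈ l, f a x = a) : l.foldl f acc = acc := by
  induction l generalizing acc with
  | nil => rfl
  | cons x xs ih =>
    simp only [List.foldl_cons, h acc x (by simp)]
    exact ih acc (fun a y hy => h a y (by simp [hy]))

-- per-row: A's full column scan equals B's border-only column scan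
theorem pvRow_eq (state : List (List Int)) (mx mn : Int) (r : Nat)
    (hr : r < state.length) (acc : Int × Int) :
    (PySem.List.pyRange 0 (state.length : Int)).foldl (pvBodyA state mx mn (↑r)) acc
    = (if (r : Int) == 0 || (r : Int) == (state.length : Int) - 1
        then PySem.List.pyRange 0 (state.length : Int) else [0, (state.length : Int) - 1]).foldl
        (pvBodyB state mx mn (↑r)) acc := by
  by_cases hb : r = 0 ∨ r = state.length - 1
  · have hif : ((r : Int) == 0 || (r : Int) == (state.length : Int) - 1) = true := by
      simp only [Bool.or_eq_true, beq_iff_eq]; omega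
    rw [hif, if_pos rfl, PySem.List.pyRange_zero_natCast, List.foldl_map, List.foldl_map]
    exact PySem.List.foldl_congr_mem _ _ _ acc (fun a c hc =>
      pvBody_border state mx mn r c (by omega) hr a)
  · simp only [not_or] at hb
    have hn3 : 3 ≤ state.length := by omega
    have hif : ((r : Int) == 0 || (r : Int) == (state.length : Int) - 1) = false := by
      simp only [Bool.or_eq_false_iff, beq_eq_false_iff_ne, ne_eq]; omega
    rw [hif, if_neg (by simp)]
    -- decompose the column range: first column, interior, last column
    have hdec : List.range state.length
        = 0 :: (List.range' 1 (state.length - 2) ++ [state.length - 1]) := by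
      obtain ⟨m, hm⟩ : ∃ m, state.length = m + 3 := ⟨state.length - 3, by omega⟩
      rw [hm, show m + 3 - 2 = m + 1 by omega, show m + 3 - 1 = m + 2 by omega,
          List.range_eq_range']
      have lcon : List.range' 1 (m + 1 + 1) = List.range' 1 (m + 1) ++ [m + 2] := by
        have h12 : 1 + 1 * (m + 1) = m + 2 := by omega
        rw [List.range'_concat, h12]
      calc List.range' 0 (m + 3) = 0 :: List.range' 1 (m + 2) := List.range'_succ
        _ = 0 :: (List.range' 1 (m + 1) ++ [m + 2]) := by rw [← lcon]
    rw [PySem.List.pyRange_zero_natCast, List.foldl_map, hdec]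
    simp only [List.foldl_cons, List.foldl_append]
    rw [pvFoldl_id (List.range' 1 (state.length - 2)) _ _ (fun a c hc => by
      rw [List.mem_range'_1] at hc
      exact pvBodyA_interior state mx mn r c (by omega) (by omega) (by omega) (by omega) hr
        (by omega) a)]
    have e0 : pvBodyA state mx mn (↑r) acc (↑(0 : Nat))
        = pvBodyB state mx mn (↑r) acc (↑(0 : Nat)) :=
      pvBody_border state mx mn r 0 (by omega) hr acc
    have e1 : ∀ a, pvBodyA state mx mn (↑r) a (↑(state.length - 1))
        = pvBodyB state mx mn (↑r) a (↑(state.length - 1)) := fun a =>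
      pvBody_border state mx mn r (state.length - 1) (by omega) hr a
    have hcast : ((state.length - 1 : Nat) : Int) = (state.length : Int) - 1 := by omega
    simp only [List.foldl_nil]
    rw [← hcast]
    push_cast at e0 ⊢
    rw [e0, e1]

-- ===== VERDICT (by name: the statement is the Claim_ definition above) =====
theorem stability_spec : Claim_equal_stability := by
  intro state mx mn _ _
  unfold Spec_stability
  simp only [stability, stability_alt]
  have h : (PySem.List.pyRange 0 (state.length : Int)).foldl
        (fun acc row => (PySem.List.pyRange 0 (state.length : Int)).foldl
          (pvBodyA state mx mn row) acc) ((0 : Int), (0 : Int))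
      = (PySem.List.pyRange 0 (state.length : Int)).foldl
        (fun acc row =>
          (if row == 0 || row == (state.length : Int) - 1
            then PySem.List.pyRange 0 (state.length : Int)
            else [0, (state.length : Int) - 1]).foldl
          (pvBodyB state mx mn row) acc) ((0 : Int), (0 : Int)) := by
    rw [PySem.List.pyRange_zero_natCast, List.foldl_map, List.foldl_map]
    refine PySem.List.foldl_congr_mem _ _ _ (0, 0) (fun a r hr => ?_)
    rw [← PySem.List.pyRange_zero_natCast]
    exact pvRow_eq state mx mn r (List.mem_range.mp hr) a
  rw [h]
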